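-- pv_equiv track=rewrite | github.com/s-ono-123456/streamlit | excel_utils.py | remove_empty_columns
-- ===== SOURCE A (Python) =====
-- def remove_empty_columns(table: list) -> list:
--     """
--     表データから空の列を削除する関数。
--
--     Args:
--         table (list): 2次元リスト形式の表データ。
--
--     Returns:
--         list: 空の列が削除された表データ。
--     """
--     # 列ごとにデータが存在するかを確認
--     non_empty_columns = [
--         any(row[i] is not None and row[i] != "" for row in table)
--         for i in range(len(table[0]))
--     ]
--
--     # 空でない列のみを残す
--     return [
--         [cell for i, cell in enumerate(row) if non_empty_columns[i]]
--         for row in table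
--     ]
-- ===== SOURCE B (Python) =====
-- def remove_empty_columns(table: list) -> list:
--     """Column-wise re-implementation: transpose with zip, keep non-empty columns,
--     transpose back (empty rows are preserved explicitly when no column survives)."""
--     kept = [col for col in zip(*table)
--             if any(cell is not None and cell != "" for cell in col)]
--     if not kept:
--         return [[] for _ in table]
--     return [list(row) for row in zip(*kept)]
-- ===== Notes on version B (the rewrite author's own statement) =====
-- stated objective: idiomatic
-- what changed: B transposes the table once with zip(*...), filters whole columns, and transposes back, instead of A's per-column index probing any(row[i] ...) followed by a per-row enumerate filter.
-- outside the precondition, e.g. on remove_empty_columns([]): A raises IndexError, B returns []; on remove_empty_columns([['a', 'b'], ['x']]): A returns [['a', 'b'], ['x']], B returns [['a'], ['x']]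
import Mathlib
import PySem

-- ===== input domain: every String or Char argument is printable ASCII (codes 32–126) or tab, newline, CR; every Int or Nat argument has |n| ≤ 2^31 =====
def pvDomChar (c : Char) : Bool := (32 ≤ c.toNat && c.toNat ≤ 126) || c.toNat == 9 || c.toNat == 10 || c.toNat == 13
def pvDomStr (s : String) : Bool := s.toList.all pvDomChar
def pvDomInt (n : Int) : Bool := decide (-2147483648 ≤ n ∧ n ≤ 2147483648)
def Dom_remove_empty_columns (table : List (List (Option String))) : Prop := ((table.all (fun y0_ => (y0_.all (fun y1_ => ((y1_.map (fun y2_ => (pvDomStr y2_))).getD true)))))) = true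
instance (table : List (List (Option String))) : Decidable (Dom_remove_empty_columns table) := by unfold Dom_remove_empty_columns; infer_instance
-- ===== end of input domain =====

-- B transposes the table with a zip(*...)-style transpose and filters whole columns,
-- instead of A's per-column index probing plus per-row enumerate filter (different
-- decomposition, same cost). Equivalence is proved on nonempty rectangular tables.


-- 'cell is not None and cell != ""' on an Option String cell (shared truthiness test)
def pvCell (v : Option String) : Bool :=
  match v with
  | none => false
  | some s => s ≠ ""

-- ===== PORT A =====
-- A: build non_empty_columns by probing row[i] for each i in range(len(table[0])),
-- then keep, in each row, the cells whose index is marked.  Indexing row[i] /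
-- non_empty_columns[i] is in range on the rectangular inputs admitted by Pre_.
def remove_empty_columns (table : List (List (Option String))) : List (List (Option String)) :=
  let nec : List Bool :=
    (PySem.List.pyRange 0 ((table.headD []).length) 1).map
      (fun i => table.any (fun row => pvCell (PySem.List.pyGetD row i none)))
  table.map (fun row =>
    ((PySem.List.enumerate row).filter (fun ic => PySem.List.pyGetD nec ic.1 false)).map (·.2))

-- ===== PORT B =====
-- zip(*rows): truncating transpose (columns up to the shortest row), as Python's zip
def pvZipStar (rows : List (List (Option String))) : List (List (Option String)) :=
  match rows with
  | [] => []
  | r :: rs =>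
    let m : Int := rs.foldl (fun acc l => min acc (l.length : Int)) (r.length : Int)
    (PySem.List.pyRange 0 m 1).map (fun i => (r :: rs).map (fun l => PySem.List.pyGetD l i none))

def remove_empty_columns_alt (table : List (List (Option String))) : List (List (Option String)) :=
  let kept := (pvZipStar table).filter (fun col => col.any pvCell)
  if kept.isEmpty then table.map (fun _ => []) else pvZipStar kept

-- ===== PRECONDITION & SPEC =====
-- Pre_ excludes the empty table (A raises IndexError on table[0]) and ragged tables,
-- on which A's row[i]/non_empty_columns[i] indexing usually raises and, where it happens
-- to return (rows shorter than row 0 whose probed prefix is non-empty), the value is an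
-- accident of A's indexing that zip-truncation cannot and should not reproduce.
def Pre_remove_empty_columns (table : List (List (Option String))) : Prop :=
  table ≠ [] ∧ ∀ row ∈ table, row.length = (table.headD []).length
instance (table : List (List (Option String))) : Decidable (Pre_remove_empty_columns table) := by unfold Pre_remove_empty_columns; infer_instance

def pvWitness_remove_empty_columns : List (List (Option String)) :=
  [[some "a", none, some ""], [some "", some "x", none]]

def Spec_remove_empty_columns (table : List (List (Option String))) (out : List (List (Option String))) : Prop := out = remove_empty_columns_alt table
instance (table : List (List (Option String))) (out : List (List (Option String))) : Decidable (Spec_remove_empty_columns table out) := by unfold Spec_remove_empty_columns; infer_instance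

-- ===== CLAIM (what is proved, stated in full; the proofs are below) =====
def Claim_equal_remove_empty_columns : Prop := ∀ (table : List (List (Option String))), Dom_remove_empty_columns table → Pre_remove_empty_columns table → Spec_remove_empty_columns table (remove_empty_columns table)

-- ===== LEMMAS AND PROOFS =====

-- the column predicate and the list of kept column indices
def pvP (t : List (List (Option String))) (i : Int) : Bool :=
  t.any (fun row => pvCell (PySem.List.pyGetD row i none))

def pvIdxs (t : List (List (Option String))) (n : Int) : List Int :=
  (PySem.List.pyRange 0 n 1).filter (pvP t)

lemma pvMinFold (rs : List (List (Option String))) (n : Int)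
    (h : ∀ l ∈ rs, (l.length : Int) = n) :
    rs.foldl (fun acc l => min acc (l.length : Int)) n = n := by
  induction rs with
  | nil => rfl
  | cons a as ih =>
    simp only [List.foldl_cons]
    rw [h a (by simp), min_self]
    exact ih (fun l hl => h l (by simp [hl]))

-- pvZipStar on an all-length-n nonempty list of rows
lemma pvZipStar_rect (r : List (Option String)) (rs : List (List (Option String)))
    (n : Int) (hn : (r.length : Int) = n)
    (h : ∀ l ∈ rs, (l.length : Int) = n) :
    pvZipStar (r :: rs) =
      (PySem.List.pyRange 0 n 1).map
        (fun i => (r :: rs).map (fun l => PySem.List.pyGetD l i none)) := by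
  simp only [pvZipStar]
  rw [hn, pvMinFold rs n h]

lemma pvRowA (t : List (List (Option String))) (n : Int) (row : List (Option String))
    (hrow : (row.length : Int) = n) :
    ((PySem.List.enumerate row).filter
        (fun ic => PySem.List.pyGetD
          ((PySem.List.pyRange 0 n 1).map (pvP t)) ic.1 false)).map (·.2)
      = (pvIdxs t n).map (fun i => PySem.List.pyGetD row i none) := by
  rw [PySem.List.enumerate_eq_map_pyRange row none]
  rw [List.filter_map]
  rw [List.map_map]
  simp only [PySem.List.len]
  rw [hrow]
  rw [pvIdxs, List.filter_congr (p := _)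
    (q := pvP t) (fun i hi => by
      have hm := PySem.List.mem_pyRange_one.mp hi
      simp only [Function.comp]
      rw [PySem.List.pyGetD_map_pyRange_of_nonneg (pvP t) n i false hm.1 hm.2])]
  rfl

-- ===== VERDICT (by name: the statement is the Claim_ definition above) =====
theorem remove_empty_columns_spec : Claim_equal_remove_empty_columns := by
  intro table _ hpre
  obtain ⟨hne, hrect⟩ := hpre
  obtain ⟨r, rs, rfl⟩ := List.exists_cons_of_ne_nil hne
  unfold Spec_remove_empty_columns
  set t := r :: rs with ht
  set n : Int := (r.length : Int) with hn
  -- characterize A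
  have hA : remove_empty_columns t
      = t.map (fun row => (pvIdxs t n).map (fun i => PySem.List.pyGetD row i none)) := by
    simp only [remove_empty_columns, ht]
    refine List.map_congr_left (fun row hrow => ?_)
    exact pvRowA t n row (by rw [hrect row hrow]; rfl)
  -- characterize B
  have hzt : pvZipStar t
      = (PySem.List.pyRange 0 n 1).map
          (fun i => t.map (fun l => PySem.List.pyGetD l i none)) :=
    pvZipStar_rect r rs n rfl (fun l hl => by rw [hrect l (by simp [ht, hl])]; rfl)
  have hkept : (pvZipStar t).filter (fun col => col.any pvCell)
      = (pvIdxs t n).map (fun i => t.map (fun l => PySem.List.pyGetD l i none)) := by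
    rw [hzt, List.filter_map, pvIdxs]
    congr 1
    refine List.filter_congr (fun i _ => ?_)
    simp only [Function.comp, List.any_map, pvP]
    rfl
  rw [hA]
  simp only [remove_empty_columns_alt, hkept]
  by_cases hidx : pvIdxs t n = []
  · simp [hidx]
  · have hkne : (pvIdxs t n).map (fun i => t.map (fun l => PySem.List.pyGetD l i none)) ≠ [] := by
      simp [hidx]
    rw [if_neg (by simpa [List.isEmpty_iff] using hkne)]
    obtain ⟨i0, is, his⟩ := List.exists_cons_of_ne_nil hidx
    -- both sides: map over rows of t
    have key : ∀ g : List (Option String) → List (Option String),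
        (PySem.List.pyRange 0 (t.length : Int) 1).map
          (fun j => g (PySem.List.pyGetD t j [])) = t.map g := by
      intro g
      conv_rhs => rw [← PySem.List.map_pyGetD_pyRange_zero t []]
      rw [List.map_map]
      rfl
    rw [his, ← key (fun row => (i0 :: is).map (fun i => PySem.List.pyGetD row i none))]
    rw [show (List.map (fun i => t.map (fun l => PySem.List.pyGetD l i none)) (i0 :: is))
          = (t.map (fun l => PySem.List.pyGetD l i0 none))
              :: is.map (fun i => t.map (fun l => PySem.List.pyGetD l i none)) from rfl]
    rw [pvZipStar_rect _ _ (t.length : Int) (by simp) (fun l hl => by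
      obtain ⟨j, _, rfl⟩ := List.mem_map.mp hl; simp)]
    refine List.map_congr_left (fun j hj => ?_)
    simp only [List.map_cons, List.map_map]
    congr 1
    · have hnil : PySem.List.pyGetD ([] : List (Option String)) i0 none = none := by
        simp [PySem.List.pyGetD, PySem.List.pyGet?, PySem.List.pyIdx?]
      have heq := PySem.List.pyGetD_map (fun l => PySem.List.pyGetD l i0 none) t j []
      simp only [hnil] at heq
      exact heq.symm
    · refine List.map_congr_left (fun i _ => ?_)
      have hnil : PySem.List.pyGetD ([] : List (Option String)) i none = none := by
        simp [PySem.List.pyGetD, PySem.List.pyGet?, PySem.List.pyIdx?]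
      have heq := PySem.List.pyGetD_map (fun l => PySem.List.pyGetD l i none) t j []
      simp only [Function.comp, hnil] at heq ⊢
      exact heq.symm
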